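-- pv_equiv track=rewrite | github.com/lucasSaavedra123/informaticaGeneral | Practica/Practica 6/Ejercicio 10.py | atributoTriple
-- ===== SOURCE A (Python) =====
-- def atributoTriple(lst):
--
--     contador = 0
--     contadorTriples = 0
--     i = 1
--
--     while i < len(lst):
--
--         if lst[i]==lst[i-1]:
--             contador +=1
--         else:
--             if contador == 2:
--                 contadorTriples+=1
--
--             contador = 0
--
--         i+=1
--
--     if contador == 2:
--             contadorTriples+=1
--
--     if contadorTriples == 0:
--         return "NADA"
--     elif contadorTriples == 2:
--         return "Dos Triple"
--     elif contadorTriples == 1: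
--         return "Un Triple"
--     elif contadorTriples >= 3:
--         return "+ Triple"
-- ===== SOURCE B (Python) =====
-- def atributoTriple(lst):
--     runs = []
--     for x in lst:
--         if runs and runs[-1][0] == x:
--             runs[-1] = (x, runs[-1][1] + 1)
--         else:
--             runs.append((x, 1))
--     n = len([r for r in runs if r[1] == 3])
--     return ["NADA", "Un Triple", "Dos Triple"][n] if n < 3 else "+ Triple"
-- ===== Notes on version B (the rewrite author's own statement) =====
-- stated objective: idiomatic
-- what changed: B first run-length-encodes the list into (value,length) runs, then counts runs of length exactly 3 and maps the count through a label table, replacing A's in-loop running counter with its end-of-loop flush and elif chain.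
import Mathlib
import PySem

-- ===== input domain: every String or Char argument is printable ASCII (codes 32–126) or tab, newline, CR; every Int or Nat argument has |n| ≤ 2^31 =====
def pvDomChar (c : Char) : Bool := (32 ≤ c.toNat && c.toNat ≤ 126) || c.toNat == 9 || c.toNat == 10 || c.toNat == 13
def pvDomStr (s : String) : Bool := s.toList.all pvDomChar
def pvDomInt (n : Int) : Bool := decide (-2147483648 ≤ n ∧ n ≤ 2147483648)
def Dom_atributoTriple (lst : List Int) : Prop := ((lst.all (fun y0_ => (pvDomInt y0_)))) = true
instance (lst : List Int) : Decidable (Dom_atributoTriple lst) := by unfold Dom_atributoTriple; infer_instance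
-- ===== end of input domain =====

-- B replaces A's running pair-counter (with its end-of-loop flush and elif chain) by a
-- run-length encoding pass followed by a count of length-3 runs mapped through a label table.

-- ===== PORT A =====
-- A's while loop compares lst[i] with lst[i-1] for i = 1..len-1; ported as a recursion
-- carrying the previous element and the two counters (same state, same branch order).
def pvALoop (prev : Int) (rest : List Int) (contador contadorTriples : Int) : Int × Int :=
  match rest with
  | [] => (contador, contadorTriples)
  | x :: rs =>
    if x == prev then pvALoop x rs (contador + 1) contadorTriples
    else pvALoop x rs 0 (if contador == 2 then contadorTriples + 1 else contadorTriples)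

def atributoTriple (lst : List Int) : String :=
  let st : Int × Int :=
    match lst with
    | [] => (0, 0)                    -- loop body never runs when len(lst) < 2
    | h :: rest => pvALoop h rest 0 0
  let contadorTriples := if st.1 == 2 then st.2 + 1 else st.2
  if contadorTriples == 0 then "NADA"
  else if contadorTriples == 2 then "Dos Triple"
  else if contadorTriples == 1 then "Un Triple"
  else "+ Triple"                     -- Python's final 'elif contadorTriples >= 3' (always reached there)

-- ===== PORT B =====
-- one step of B's for-loop: extend the last run or start a new one
def pvStep (runs : List (Int × Int)) (x : Int) : List (Int × Int) :=
  match runs.getLast? with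
  | some (v, c) => if v == x then runs.dropLast ++ [(x, c + 1)] else runs ++ [(x, 1)]
  | none => [(x, 1)]

def atributoTriple_alt (lst : List Int) : String :=
  let runs := lst.foldl pvStep []
  let n := (runs.filter (fun r => r.2 == 3)).length
  if n < 3 then ["NADA", "Un Triple", "Dos Triple"].getD n "" else "+ Triple"

-- ===== PRECONDITION & SPEC =====
def Spec_atributoTriple (lst : List Int) (out : String) : Prop := out = atributoTriple_alt lst
instance (lst : List Int) (out : String) : Decidable (Spec_atributoTriple lst out) := by unfold Spec_atributoTriple; infer_instance

-- ===== CLAIM (what is proved, stated in full; the proofs are below) =====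
def Claim_equal_atributoTriple : Prop := ∀ (lst : List Int), Dom_atributoTriple lst → Spec_atributoTriple lst (atributoTriple lst)

-- ===== LEMMAS AND PROOFS =====

-- reference count: number of maximal runs of length exactly 3, given current value `prev`
-- whose run has seen `c` equal adjacent pairs so far (run length c+1)
def pvT : Int → Int → List Int → Nat
  | _, c, [] => if c == 2 then 1 else 0
  | prev, c, x :: rs =>
    if x == prev then pvT x (c + 1) rs
    else (if c == 2 then 1 else 0) + pvT x 0 rs

theorem pvALoop_eq (rest : List Int) : ∀ (prev c t : Int),
    (if (pvALoop prev rest c t).1 == 2 then (pvALoop prev rest c t).2 + 1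
     else (pvALoop prev rest c t).2) = t + (pvT prev c rest : Int) := by
  induction rest with
  | nil => intro prev c t; simp [pvALoop, pvT]; split_ifs <;> simp
  | cons x rs ih =>
    intro prev c t
    by_cases h : x = prev
    · have hb : (x == prev) = true := by simp [h]
      simp only [pvALoop, pvT, hb, if_true]
      exact ih x (c + 1) t
    · have hb : (x == prev) = false := by simp [h]
      simp only [pvALoop, pvT, hb, Bool.false_eq_true, if_false]
      rw [ih x 0 _]
      split_ifs <;> push_cast <;> ring

theorem pvStep_fold_count (rest : List Int) : ∀ (R : List (Int × Int)) (v k : Int),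
    ((List.foldl pvStep (R ++ [(v, k)]) rest).filter (fun r => r.2 == 3)).length
      = (R.filter (fun r => r.2 == 3)).length + pvT v (k - 1) rest := by
  induction rest with
  | nil =>
    intro R v k
    by_cases hk : k = 3
    · have h2 : k - 1 = 2 := by omega
      simp [pvT, h2, hk, List.filter_append, List.filter_singleton]
    · have h2 : ¬(k - 1 = 2) := by omega
      simp [pvT, h2, hk, List.filter_append, List.filter_singleton]
  | cons x rs ih =>
    intro R v k
    by_cases h : v = x
    · have hvx : (v == x) = true := by simp [h]
      have hxv : (x == v) = true := by simp [h]
      have hstep : pvStep (R ++ [(v, k)]) x = R ++ [(x, k + 1)] := by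
        simp [pvStep, hvx]
      have harg : k + 1 - 1 = k := by ring
      have h2 : pvT v (k - 1) (x :: rs) = pvT x k rs := by
        have : k - 1 + 1 = k := by ring
        simp only [pvT, hxv, if_true, this]
      rw [List.foldl_cons, hstep, ih, harg, h2]
    · have hvx : (v == x) = false := by simp [h]
      have hxv : (x == v) = false := by simp only [beq_eq_false_iff_ne, ne_eq]; exact fun hx => h hx.symm
      have hstep : pvStep (R ++ [(v, k)]) x = (R ++ [(v, k)]) ++ [(x, 1)] := by
        simp [pvStep, hvx]
      have h2 : pvT v (k - 1) (x :: rs) = (if k - 1 = 2 then 1 else 0) + pvT x 0 rs := by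
        simp [pvT, hxv]
      have harg : (1 : Int) - 1 = 0 := by ring
      rw [List.foldl_cons, hstep, ih, harg, h2]
      by_cases hk : k = 3
      · have h3 : k - 1 = 2 := by omega
        simp [hk, h3, List.filter_append, List.filter_singleton]
        omega
      · have h3 : ¬(k - 1 = 2) := by omega
        simp [hk, h3, List.filter_append, List.filter_singleton]

-- the two label maps agree for every natural count n
theorem label_eq (n : Nat) :
    (if (n : Int) == 0 then "NADA"
     else if (n : Int) == 2 then "Dos Triple"
     else if (n : Int) == 1 then "Un Triple"
     else "+ Triple")
    = (if n < 3 then ["NADA", "Un Triple", "Dos Triple"].getD n "" else "+ Triple") := by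
  match n with
  | 0 => rfl
  | 1 => rfl
  | 2 => rfl
  | (m + 3) =>
    have h0 : ¬((m : Int) + 3 = 0) := by omega
    have h1 : ¬((m : Int) + 3 = 1) := by omega
    have h2 : ¬((m : Int) + 3 = 2) := by omega
    have h3 : ¬(m + 3 < 3) := by omega
    push_cast
    simp [h0, h1, h2, h3]

-- ===== VERDICT (by name: the statement is the Claim_ definition above) =====
theorem atributoTriple_spec : Claim_equal_atributoTriple := by
  intro lst _
  unfold Spec_atributoTriple
  match lst with
  | [] => rfl
  | h :: rest =>
    show atributoTriple (h :: rest) = atributoTriple_alt (h :: rest)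
    have hstep : pvStep [] h = ([] : List (Int × Int)) ++ [(h, 1)] := by simp [pvStep]
    have hB : ((List.foldl pvStep [] (h :: rest)).filter (fun r => r.2 == 3)).length
        = pvT h 0 rest := by
      simp only [List.foldl_cons, hstep, pvStep_fold_count]
      norm_num
    have hA := pvALoop_eq rest h 0 0
    simp only [atributoTriple, atributoTriple_alt, hB]
    rw [show (0 : Int) + (pvT h 0 rest : Int) = (pvT h 0 rest : Int) from by ring] at hA
    rw [hA]
    exact label_eq (pvT h 0 rest)
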